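-- pv_equiv track=rewrite | github.com/Mitro007/daily-coding-problem | str/functions.py | first_recurring_ch
-- ===== SOURCE A (Python) =====
-- from typing import MutableSequence, Tuple, Deque, Iterable, Counter, Sequence, MutableMapping, Mapping, Set, List
--
-- def first_recurring_ch(s: str) -> str:
--     ch_freq: MutableMapping[str, int] = dict()
--     x: Tuple[int, int] = (len(s), -1)
--
--     for i, ch in enumerate(s):
--         if ch in ch_freq:
--             last_idx: int = ch_freq[ch]
--             if i - last_idx < x[0]:
--                 x = (i - last_idx, last_idx)
--         else:
--             ch_freq[ch] = i
--
--     return s[x[1]] if x[1] >= 0 else None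
-- ===== SOURCE B (Python) =====
-- def first_recurring_ch(s: str) -> str:
--     # Pass 1: record each character's first index, and at its second
--     # occurrence its (gap, first_index) candidate; later occurrences ignored.
--     first = {}
--     gaps = {}
--     for i, ch in enumerate(s):
--         if ch not in first:
--             first[ch] = i
--         elif ch not in gaps:
--             gaps[ch] = (i - first[ch], first[ch])
--     # Pass 2: pick the candidate with the smallest gap (first wins ties).
--     best = (len(s), -1)
--     for gap, fi in gaps.values():
--         if gap < best[0]:
--             best = (gap, fi)
--     return s[best[1]] if best[1] >= 0 else None
-- ===== Notes on version B (the rewrite author's own statement) =====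
-- stated objective: alternative
-- what changed: Instead of A's single pass that re-compares a running minimum at every repeat occurrence, B collects one (gap, first-index) candidate per recurring character at its second occurrence into a dict and takes the minimum in a separate reduce pass.
import Mathlib
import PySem

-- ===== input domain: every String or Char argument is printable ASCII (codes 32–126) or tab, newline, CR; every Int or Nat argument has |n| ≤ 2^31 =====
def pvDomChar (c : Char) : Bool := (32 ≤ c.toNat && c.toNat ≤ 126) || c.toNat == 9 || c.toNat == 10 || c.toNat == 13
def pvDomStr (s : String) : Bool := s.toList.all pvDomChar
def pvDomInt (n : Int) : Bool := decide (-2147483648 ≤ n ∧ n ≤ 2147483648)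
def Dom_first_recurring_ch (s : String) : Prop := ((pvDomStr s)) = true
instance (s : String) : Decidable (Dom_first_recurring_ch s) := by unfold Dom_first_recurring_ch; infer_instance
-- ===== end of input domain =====

-- B replaces A's online running-minimum update at every repeat occurrence by a
-- collect-then-reduce scheme: pass 1 records one (gap, first-index) candidate per
-- recurring character at its second occurrence, pass 2 reduces the candidates to
-- the minimum-gap one (objective: alternative decomposition, same cost).

-- ===== PORT A =====
def frcStepA (st : PySem.Dict Char Int × Int × Int) (p : Int × Char) :
    PySem.Dict Char Int × Int × Int :=
  if st.1.contains p.2 then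
    let last_idx : Int := st.1.getD p.2 0
    if p.1 - last_idx < st.2.1 then (st.1, p.1 - last_idx, last_idx) else st
  else (st.1.insert p.2 p.1, st.2)

def first_recurring_ch (s : String) : Option String :=
  let r := (PySem.List.enumerate s.toList 0).foldl frcStepA
      (PySem.Dict.empty, (PySem.Str.len s, -1))
  if 0 ≤ r.2.2 then (PySem.Str.pyGet? s r.2.2).map (fun c => String.ofList [c]) else none

-- ===== PORT B =====
def frcStepB (st : PySem.Dict Char Int × PySem.Dict Char (Int × Int)) (p : Int × Char) :
    PySem.Dict Char Int × PySem.Dict Char (Int × Int) :=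
  if st.1.contains p.2 = false then (st.1.insert p.2 p.1, st.2)
  else if st.2.contains p.2 = false then
    (st.1, st.2.insert p.2 (p.1 - st.1.getD p.2 0, st.1.getD p.2 0))
  else st

def frcMin (best c : Int × Int) : Int × Int := if c.1 < best.1 then c else best

def first_recurring_ch_alt (s : String) : Option String :=
  let r := (PySem.List.enumerate s.toList 0).foldl frcStepB (PySem.Dict.empty, PySem.Dict.empty)
  let best := r.2.values.foldl frcMin (PySem.Str.len s, -1)
  if 0 ≤ best.2 then (PySem.Str.pyGet? s best.2).map (fun c => String.ofList [c]) else none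

-- ===== PRECONDITION & SPEC =====
def Spec_first_recurring_ch (s : String) (out : Option String) : Prop := out = first_recurring_ch_alt s
instance (s : String) (out : Option String) : Decidable (Spec_first_recurring_ch s out) := by unfold Spec_first_recurring_ch; infer_instance

-- ===== CLAIM (what is proved, stated in full; the proofs are below) =====
def Claim_equal_first_recurring_ch : Prop := ∀ (s : String), Dom_first_recurring_ch s → Spec_first_recurring_ch s (first_recurring_ch s)

-- ===== LEMMAS AND PROOFS =====

-- The reduce pass never exceeds its seed nor any candidate's gap.
theorem frcMin_fold_le (vs : List (Int × Int)) : ∀ (x0 : Int × Int),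
    (vs.foldl frcMin x0).1 ≤ x0.1 ∧ ∀ v ∈ vs, (vs.foldl frcMin x0).1 ≤ v.1 := by
  induction vs with
  | nil => intro x0; simp
  | cons v t ih =>
    intro x0
    have h := ih (frcMin x0 v)
    have hle : (frcMin x0 v).1 ≤ x0.1 ∧ (frcMin x0 v).1 ≤ v.1 := by
      unfold frcMin; split <;> omega
    refine ⟨by simpa [List.foldl_cons] using le_trans h.1 hle.1, ?_⟩
    intro w hw
    rcases List.mem_cons.mp hw with rfl | hw
    · simpa [List.foldl_cons] using le_trans h.1 hle.2
    · simpa [List.foldl_cons] using h.2 w hw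

-- Loop invariant: A's running pair x equals the frcMin-reduction of B's candidate
-- dict g (seeded at x0), and every candidate (gap, fi) in g has first index fi
-- recorded in the shared first-occurrence dict d with fi + gap < n.
theorem frc_loop (l : List Char) : ∀ (n : Int) (d : PySem.Dict Char Int)
    (x x0 : Int × Int) (g : PySem.Dict Char (Int × Int)),
    x = g.values.foldl frcMin x0 →
    (∀ ch p, g.get? ch = some p → d.get? ch = some p.2 ∧ p.2 + p.1 < n) →
    ((PySem.List.enumerate l n).foldl frcStepA (d, x)).2
      = ((PySem.List.enumerate l n).foldl frcStepB (d, g)).2.values.foldl frcMin x0 := by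
  induction l with
  | nil => intro n d x x0 g hx hg; simpa [PySem.List.enumerate_nil] using hx
  | cons c t ih =>
    intro n d x x0 g hx hg
    rw [PySem.List.enumerate_cons]
    by_cases hc : d.contains c = true
    · -- c already seen: A may update x, B may record a candidate
      obtain ⟨last, hlast⟩ : ∃ v, d.get? c = some v := by
        cases h : d.get? c with
        | none => exact absurd ((PySem.Dict.get?_eq_none_iff_contains d c).mp h) (by simp [hc])
        | some v => exact ⟨v, rfl⟩
      have hgetD : d.getD c 0 = last := PySem.Dict.getD_of_get?_eq_some d 0 hlast
      by_cases hgc : ∃ p, g.get? c = some p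
      · -- third or later occurrence: neither side changes
        obtain ⟨p, hp⟩ := hgc
        obtain ⟨hdp, hbound⟩ := hg c p hp
        have hpl : last = p.2 := by rw [hlast] at hdp; exact (Option.some.injEq _ _).mp hdp
        have hpmem : p ∈ g.values := by
          rw [PySem.Dict.values]
          exact List.mem_map.mpr ⟨(c, p), PySem.Dict.mem_items_of_get?_eq_some g hp, rfl⟩
        have hxle : x.1 ≤ p.1 := hx ▸ (frcMin_fold_le g.values x0).2 p hpmem
        have hstepA : frcStepA (d, x) (n, c) = (d, x) := by
          simp only [frcStepA, hc, if_true, hgetD]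
          have : ¬ (n - last < x.1) := by omega
          simp [this]
        have hstepB : frcStepB (d, g) (n, c) = (d, g) := by
          simp [frcStepB, hc, PySem.Dict.contains_eq_isSome_get?, hp]
        rw [List.foldl_cons, List.foldl_cons, hstepA, hstepB]
        exact ih (n + 1) d x x0 g hx (fun ch q hq => ⟨(hg ch q hq).1, by have := (hg ch q hq).2; omega⟩)
      · -- second occurrence: B appends (n - last, last), A folds it into x
        have hgn : g.get? c = none := by
          cases h : g.get? c with
          | none => rfl
          | some q => exact absurd ⟨q, h⟩ hgc
        have hgcont : g.contains c = false := by
          rw [PySem.Dict.contains_eq_isSome_get?, hgn]; rfl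
        have hstepA : frcStepA (d, x) (n, c) = (d, frcMin x (n - last, last)) := by
          simp only [frcStepA, hc, if_true, hgetD, frcMin]
          split <;> rfl
        have hstepB : frcStepB (d, g) (n, c) = (d, g.insert c (n - last, last)) := by
          simp [frcStepB, hc, hgcont, hgetD]
        rw [List.foldl_cons, List.foldl_cons, hstepA, hstepB]
        refine ih (n + 1) d (frcMin x (n - last, last)) x0 (g.insert c (n - last, last)) ?_ ?_
        · have hv : (g.insert c (n - last, last)).values = g.values ++ [(n - last, last)] := by
            rw [PySem.Dict.values, PySem.Dict.values, PySem.Dict.items_insert_of_not_contains g _ hgcont]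
            simp
          rw [hv, List.foldl_append, ← hx]; rfl
        · intro ch q hq
          rw [PySem.Dict.get?_insert] at hq
          by_cases hch : ch = c
          · subst hch
            rw [if_pos rfl] at hq
            obtain rfl := (Option.some.injEq _ _).mp hq
            exact ⟨hlast, by omega⟩
          · rw [if_neg hch] at hq
            exact ⟨(hg ch q hq).1, by have := (hg ch q hq).2; omega⟩
    · -- first occurrence of c: both sides insert it into the first-index dict
      have hcn : d.get? c = none := by
        exact (PySem.Dict.get?_eq_none_iff_contains d c).mpr (by simpa using hc)
      have hstepA : frcStepA (d, x) (n, c) = (d.insert c n, x) := by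
        simp [frcStepA, hc]
      have hstepB : frcStepB (d, g) (n, c) = (d.insert c n, g) := by
        simp [frcStepB, hc]
      rw [List.foldl_cons, List.foldl_cons, hstepA, hstepB]
      refine ih (n + 1) (d.insert c n) x x0 g hx ?_
      intro ch q hq
      have hne : ch ≠ c := by
        intro h; subst h
        exact absurd ((hg ch q hq).1.symm.trans hcn).symm (by simp)
      rw [PySem.Dict.get?_insert_of_ne d n hne]
      exact ⟨(hg ch q hq).1, by have := (hg ch q hq).2; omega⟩

theorem frc_eq (s : String) : first_recurring_ch s = first_recurring_ch_alt s := by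
  unfold first_recurring_ch first_recurring_ch_alt
  have h := frc_loop s.toList 0 PySem.Dict.empty (PySem.Str.len s, -1) (PySem.Str.len s, -1)
      PySem.Dict.empty (by simp [PySem.Dict.values, PySem.Dict.empty]) (by intro ch p hp; simp [PySem.Dict.empty, PySem.Dict.get?] at hp)
  simp only [h]

-- ===== VERDICT (by name: the statement is the Claim_ definition above) =====
theorem first_recurring_ch_spec : Claim_equal_first_recurring_ch := by
  intro s _
  unfold Spec_first_recurring_ch
  exact frc_eq s
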